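-- pv_equiv track=rewrite | github.com/JoseBlanca/ngs_crumbs | crumbs/vcf/smooth.py | _count_recombinations
-- ===== SOURCE A (Python) =====
-- def _count_recombinations(sample_genotypes):
--     last_gt = None
--     recombs = 0
--     for gt in sample_genotypes:
--         if last_gt is None:
--             last_gt = gt
--             continue
--         if gt is None:
--             continue
--         if last_gt != gt:
--             recombs += 1
--             last_gt = gt
--     return recombs
-- ===== SOURCE B (Python) =====
-- def _summarize(gts):
--     # (first non-None, last non-None, recombination count) of a non-empty segment
--     if len(gts) == 1:
--         g = gts[0]
--         return (g, g, 0)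
--     mid = len(gts) // 2
--     f1, l1, c1 = _summarize(gts[:mid])
--     f2, l2, c2 = _summarize(gts[mid:])
--     bridge = 1 if l1 is not None and f2 is not None and l1 != f2 else 0
--     first = f1 if f1 is not None else f2
--     last = l2 if l2 is not None else l1
--     return (first, last, c1 + c2 + bridge)
--
--
-- def _count_recombinations(sample_genotypes):
--     if not sample_genotypes:
--         return 0
--     return _summarize(sample_genotypes)[2]
-- ===== Notes on version B (the rewrite author's own statement) =====
-- stated objective: alternative
-- what changed: Replaced the linear last_gt state-machine scan with a divide-and-conquer over halves that computes a (first non-None, last non-None, count) segment summary and combines the halves with a bridge term.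
import Mathlib
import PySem

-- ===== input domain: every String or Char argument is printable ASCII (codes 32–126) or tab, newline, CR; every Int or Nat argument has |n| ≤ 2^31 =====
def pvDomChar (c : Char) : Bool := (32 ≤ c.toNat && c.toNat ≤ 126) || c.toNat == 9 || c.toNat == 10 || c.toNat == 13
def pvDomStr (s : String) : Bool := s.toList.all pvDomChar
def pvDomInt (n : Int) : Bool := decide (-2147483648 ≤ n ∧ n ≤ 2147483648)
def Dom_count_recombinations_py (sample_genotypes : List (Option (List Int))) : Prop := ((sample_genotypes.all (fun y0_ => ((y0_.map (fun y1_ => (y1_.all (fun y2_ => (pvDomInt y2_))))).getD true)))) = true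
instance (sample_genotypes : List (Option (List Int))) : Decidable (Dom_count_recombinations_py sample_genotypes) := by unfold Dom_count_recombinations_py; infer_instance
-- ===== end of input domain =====

-- B replaces A's running last_gt state machine with a divide-and-conquer over halves
-- using (first non-None, last non-None, count) segment summaries (alternative; same cost).


-- ===== PORT A =====
-- the for-loop of A with its two mutable variables (last_gt, recombs), continues kept as branch order
def crLoopA (last_gt : Option (List Int)) (recombs : Int) : List (Option (List Int)) → Int
  | [] => recombs
  | gt :: rest =>
    match last_gt with
    | none => crLoopA gt recombs rest
    | some l =>
      match gt with
      | none => crLoopA (some l) recombs rest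
      | some g =>
        if l ≠ g then crLoopA (some g) (recombs + 1) rest
        else crLoopA (some l) recombs rest

def count_recombinations_py (sample_genotypes : List (Option (List Int))) : Int :=
  crLoopA none 0 sample_genotypes

-- ===== PORT B =====
-- _summarize of Source B: divide-and-conquer segment summary (first non-None, last non-None, count)
def crSum : List (Option (List Int)) → Option (List Int) × Option (List Int) × Int
  | [] => (none, none, 0)   -- never reached from the port (guard for totality)
  | [g] => (g, g, 0)
  | g1 :: g2 :: rest =>
    let gts := g1 :: g2 :: rest
    let mid := gts.length / 2
    let s1 := crSum (gts.take mid)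
    let s2 := crSum (gts.drop mid)
    let bridge : Int := match s1.2.1, s2.1 with
      | some a, some b => if a ≠ b then 1 else 0
      | _, _ => 0
    (s1.1.or s2.1, s2.2.1.or s1.2.1, s1.2.2 + s2.2.2 + bridge)
termination_by gts => gts.length
decreasing_by
  · simp [List.length_take]; omega
  · simp; omega

def count_recombinations_py_alt (sample_genotypes : List (Option (List Int))) : Int :=
  if sample_genotypes = [] then 0 else (crSum sample_genotypes).2.2

-- ===== PRECONDITION & SPEC =====
def Spec_count_recombinations_py (sample_genotypes : List (Option (List Int))) (out : Int) : Prop := out = count_recombinations_py_alt sample_genotypes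
instance (sample_genotypes : List (Option (List Int))) (out : Int) : Decidable (Spec_count_recombinations_py sample_genotypes out) := by unfold Spec_count_recombinations_py; infer_instance

-- ===== CLAIM (what is proved, stated in full; the proofs are below) =====
def Claim_equal_count_recombinations_py : Prop := ∀ (sample_genotypes : List (Option (List Int))), Dom_count_recombinations_py sample_genotypes → Spec_count_recombinations_py sample_genotypes (count_recombinations_py sample_genotypes)

-- ===== LEMMAS AND PROOFS =====
-- number of changes in prev :: ys
def crChanges (prev : List Int) : List (List Int) → Int
  | [] => 0
  | y :: ys => (if prev = y then 0 else 1) + crChanges y ys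

-- number of adjacent changes in a list
def crTrans : List (List Int) → Int
  | [] => 0
  | x :: xs => crChanges x xs

theorem crLoopA_some (l : List Int) (r : Int) (xs : List (Option (List Int))) :
    crLoopA (some l) r xs = r + crChanges l (xs.filterMap id) := by
  induction xs generalizing l r with
  | nil => simp [crLoopA, crChanges]
  | cons hd tl ih =>
    cases hd with
    | none => simp [crLoopA, ih]
    | some g =>
      by_cases h : l = g
      · simp [crLoopA, h, ih, crChanges]
      · simp [crLoopA, h, ih, crChanges]; omega

theorem crLoopA_none (r : Int) (xs : List (Option (List Int))) :
    crLoopA none r xs = r + crTrans (xs.filterMap id) := by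
  induction xs generalizing r with
  | nil => simp [crLoopA, crTrans]
  | cons hd tl ih =>
    cases hd with
    | none => simpa [crLoopA] using ih r
    | some g =>
      rw [show crLoopA none r (some g :: tl) = crLoopA (some g) r tl from rfl, crLoopA_some]
      simp [crTrans]

theorem crChanges_append (p : List Int) (as bs : List (List Int)) :
    crChanges p (as ++ bs) = crChanges p as + crChanges (as.getLast?.getD p) bs := by
  induction as generalizing p with
  | nil => simp [crChanges]
  | cons a as ih =>
    simp only [List.cons_append, crChanges, ih a]
    have : (a :: as).getLast?.getD p = as.getLast?.getD a := by
      simp [List.getLast?_cons]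
    rw [this]; ring

def crBridge : Option (List Int) → Option (List Int) → Int
  | some a, some b => if a ≠ b then 1 else 0
  | _, _ => 0

theorem crChanges_eq_trans (L : List Int) (bs : List (List Int)) :
    crChanges L bs = crTrans bs + crBridge (some L) bs.head? := by
  cases bs with
  | nil => simp [crChanges, crTrans, crBridge]
  | cons y ys =>
    show (if L = y then 0 else 1) + crChanges y ys = crChanges y ys + crBridge (some L) (some y)
    rcases eq_or_ne L y with h | h
    · simp [crBridge, h]
    · simp [crBridge, h]; ring

theorem crTrans_append (as bs : List (List Int)) :
    crTrans (as ++ bs) = crTrans as + crTrans bs + crBridge as.getLast? bs.head? := by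
  cases as with
  | nil => simp [crTrans, crBridge]
  | cons x as' =>
    have hl : (x :: as').getLast? = some (as'.getLast?.getD x) := by
      simp [List.getLast?_cons]
    have h1 : crTrans ((x :: as') ++ bs) = crChanges x (as' ++ bs) := rfl
    have h2 : crTrans (x :: as') = crChanges x as' := rfl
    rw [h1, h2, crChanges_append, hl, crChanges_eq_trans x as', crChanges_eq_trans (as'.getLast?.getD x) bs]; ring

theorem crSum_spec (gts : List (Option (List Int))) :
    crSum gts = ((gts.filterMap id).head?, (gts.filterMap id).getLast?, crTrans (gts.filterMap id)) := by
  induction gts using crSum.induct with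
  | case1 => simp [crSum, crTrans]
  | case2 g => cases g <;> simp [crSum, crTrans, crChanges]
  | case3 g1 g2 rest gts mid ih1 ih2 =>
    rw [crSum, ih1, ih2]
    have hsplit : g1 :: g2 :: rest =
        (g1 :: g2 :: rest).take ((g1 :: g2 :: rest).length / 2) ++
        (g1 :: g2 :: rest).drop ((g1 :: g2 :: rest).length / 2) := (List.take_append_drop _ _).symm
    conv_rhs => rw [hsplit]
    simp only [List.filterMap_append, List.head?_append, List.getLast?_append, crTrans_append]
    refine Prod.ext rfl (Prod.ext rfl ?_)
    simp only [crBridge]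
    ring

-- ===== VERDICT (by name: the statement is the Claim_ definition above) =====
theorem count_recombinations_py_spec : Claim_equal_count_recombinations_py := by
  intro xs _
  unfold Spec_count_recombinations_py count_recombinations_py count_recombinations_py_alt
  rw [crSum_spec, crLoopA_none]
  split <;> simp_all [crTrans]
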